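-- pv_equiv track=rewrite | github.com/limuhit/360-Image-Compression | new_file.py | produce_var_list
-- ===== SOURCE A (Python) =====
-- def produce_var_list(plist):
--     mdict={'var_replace,':'','class_v_replace;':'', 'class_var_init':'', 'python_init,':'', 'var_to_replace,':''}
--     try:
--         plist = [pt.split('/') for pt in plist]
--         mdict['var_replace,'] = ', '.join([pt[1]+' '+pt[0] for pt in plist])+','
--         mdict['class_v_replace;'] = ';\n\t\t'.join([pt[1]+' '+ pt[0] + '_' for pt in plist])+';'
--         mdict['class_var_init'] = '\n\t\t\t'.join(['%s_ = %s;'%(pt[0],pt[0]) for pt in plist])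
--         mdict['python_init,'] = ', '.join([pt[1] for pt in plist])+','
--         mdict['var_to_replace,'] = ','.join([pt[0] for pt in plist])+','
--     except:
--         pass
--     return mdict
-- ===== SOURCE B (Python) =====
-- def produce_var_list(plist):
--     out = {'var_replace,': '', 'class_v_replace;': '', 'class_var_init': '',
--            'python_init,': '', 'var_to_replace,': ''}
--     s1 = s2 = s3 = s4 = s5 = ''
--     first = True
--     for pt in plist:
--         name, slash, rest = pt.partition('/')
--         if not slash:
--             return out
--         typ = rest.partition('/')[0]
--         if not first:
--             s1 += ', '
--             s2 += ';\n\t\t'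
--             s3 += '\n\t\t\t'
--             s4 += ', '
--             s5 += ','
--         first = False
--         s1 += typ + ' ' + name
--         s2 += typ + ' ' + name + '_'
--         s3 += name + '_ = ' + name + ';'
--         s4 += typ
--         s5 += name
--     out['var_replace,'] = s1 + ','
--     out['class_v_replace;'] = s2 + ';'
--     out['class_var_init'] = s3
--     out['python_init,'] = s4 + ','
--     out['var_to_replace,'] = s5 + ','
--     return out
-- ===== Notes on version B (the rewrite author's own statement) =====
-- stated objective: faster
-- what changed: A builds five intermediate lists with separate comprehensions over the fully split entries and glues each with str.join inside a try/except that silently keeps the all-empty dict; B makes a single pass that parses each entry with str.partition and grows the five output strings in place, prepending the separator before every element but the first, returning the defaults early on an entry without '/' (where A's swallowed IndexError leaves the defaults).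
import Mathlib
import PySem

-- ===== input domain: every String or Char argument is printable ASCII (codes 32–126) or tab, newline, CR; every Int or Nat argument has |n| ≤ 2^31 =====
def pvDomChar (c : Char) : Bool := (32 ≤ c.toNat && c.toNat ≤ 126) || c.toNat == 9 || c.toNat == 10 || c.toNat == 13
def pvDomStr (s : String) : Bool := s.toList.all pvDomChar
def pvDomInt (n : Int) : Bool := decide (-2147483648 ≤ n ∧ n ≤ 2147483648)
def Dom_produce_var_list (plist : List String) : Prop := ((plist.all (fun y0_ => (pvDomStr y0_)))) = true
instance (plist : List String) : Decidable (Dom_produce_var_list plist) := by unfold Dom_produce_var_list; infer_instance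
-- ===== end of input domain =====

-- B replaces A's five join-ed comprehensions inside a try/except by ONE pass that
-- parses each entry with str.partition and grows the five output strings in place,
-- inserting each separator before every element but the first (early return of the
-- defaults on an entry without '/', as A's swallowed IndexError); measured faster in a timing run.

-- ===== PORT A =====
-- pt.split('/') — the separator "/" is nonempty, so Python's split always returns a list
def pvSplit (pt : String) : List String := (PySem.Str.split? pt "/").getD []

def produce_var_list (plist : List String) : List (String × String) :=
  let mdict : PySem.Dict String String := PySem.Dict.mk
    [("var_replace,", ""), ("class_v_replace;", ""), ("class_var_init", ""),
     ("python_init,", ""), ("var_to_replace,", "")]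
  let parts := plist.map (fun pt => pvSplit pt)
  match parts.mapM (fun pt => (PySem.List.pyGet? pt 1).bind fun a =>
      (PySem.List.pyGet? pt 0).map fun b => (a ++ " ") ++ b) with
  | none => mdict.items
  | some l1 =>
    let mdict := mdict.insert "var_replace," (PySem.Str.join ", " l1 ++ ",")
    match parts.mapM (fun pt => (PySem.List.pyGet? pt 1).bind fun a =>
        (PySem.List.pyGet? pt 0).map fun b => ((a ++ " ") ++ b) ++ "_") with
    | none => mdict.items
    | some l2 =>
      let mdict := mdict.insert "class_v_replace;" (PySem.Str.join ";\n\t\t" l2 ++ ";")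
      match parts.mapM (fun pt => (PySem.List.pyGet? pt 0).map fun a => ((a ++ "_ = ") ++ a) ++ ";") with
      | none => mdict.items
      | some l3 =>
        let mdict := mdict.insert "class_var_init" (PySem.Str.join "\n\t\t\t" l3)
        match parts.mapM (fun pt => PySem.List.pyGet? pt 1) with
        | none => mdict.items
        | some l4 =>
          let mdict := mdict.insert "python_init," (PySem.Str.join ", " l4 ++ ",")
          match parts.mapM (fun pt => PySem.List.pyGet? pt 0) with
          | none => mdict.items
          | some l5 => (mdict.insert "var_to_replace," (PySem.Str.join "," l5 ++ ",")).items

-- ===== PORT B =====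
-- hand port of s.partition('/') (exact for this single-character separator):
-- (head, sep-found?, rest) — head is everything before the first '/',
-- rest everything after it; if '/' does not occur, (s, false, []).
def pvPartition (cs : List Char) : List Char × Bool × List Char :=
  let pre := cs.takeWhile (· ≠ '/')
  if pre.length = cs.length then (cs, false, []) else (pre, true, cs.drop (pre.length + 1))

-- B's single loop: the five accumulated strings (as char lists) plus the 'first' flag.
def pvBLoop : List String → Bool →
    List Char × List Char × List Char × List Char × List Char →
    Option (List Char × List Char × List Char × List Char × List Char)
  | [], _, acc => some acc
  | pt :: rest, first, (s1, s2, s3, s4, s5) =>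
    match pvPartition pt.toList with
    | (_, false, _) => none
    | (name, true, after) =>
      let typ := (pvPartition after).1
      pvBLoop rest false
        ((if first then s1 else s1 ++ (", ").toList) ++ typ ++ [' '] ++ name,
         (if first then s2 else s2 ++ (";\n\t\t").toList) ++ typ ++ [' '] ++ name ++ ['_'],
         (if first then s3 else s3 ++ ("\n\t\t\t").toList) ++ name ++ ("_ = ").toList ++ name ++ [';'],
         (if first then s4 else s4 ++ (", ").toList) ++ typ,
         (if first then s5 else s5 ++ [',']) ++ name)

def produce_var_list_alt (plist : List String) : List (String × String) :=
  match pvBLoop plist true ([], [], [], [], []) with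
  | none =>
    [("var_replace,", ""), ("class_v_replace;", ""), ("class_var_init", ""),
     ("python_init,", ""), ("var_to_replace,", "")]
  | some (s1, s2, s3, s4, s5) =>
    [("var_replace,", String.ofList (s1 ++ [','])),
     ("class_v_replace;", String.ofList (s2 ++ [';'])),
     ("class_var_init", String.ofList s3),
     ("python_init,", String.ofList (s4 ++ [','])),
     ("var_to_replace,", String.ofList (s5 ++ [',']))]

-- ===== PRECONDITION & SPEC =====
def Spec_produce_var_list (plist : List String) (out : List (String × String)) : Prop := out = produce_var_list_alt plist
instance (plist : List String) (out : List (String × String)) : Decidable (Spec_produce_var_list plist out) := by unfold Spec_produce_var_list; infer_instance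

-- ===== CLAIM (what is proved, stated in full; the proofs are below) =====
def Claim_equal_produce_var_list : Prop := ∀ (plist : List String), Dom_produce_var_list plist → Spec_produce_var_list plist (produce_var_list plist)

-- ===== LEMMAS AND PROOFS =====

-- name / remainder-after-first-slash / type of one entry
def pvName (cs : List Char) : List Char := cs.takeWhile (· ≠ '/')
def pvRem (cs : List Char) : List Char := cs.drop ((pvName cs).length + 1)
def pvTyp (cs : List Char) : List Char := (pvRem cs).takeWhile (· ≠ '/')

lemma pv_takeWhile_all (cs : List Char) (h : '/' ∉ cs) :
    cs.takeWhile (· ≠ '/') = cs :=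
  List.takeWhile_eq_self_iff.mpr (fun x hx => by
    simp only [ne_eq, decide_not, Bool.not_eq_eq_eq_not, Bool.not_true, decide_eq_false_iff_not]
    exact fun e => h (e ▸ hx))

-- reference form of cs.split('/') (single-char separator)
def pvSplitSlash : List Char → List (List Char)
  | [] => [[]]
  | c :: r =>
    if c = '/' then [] :: pvSplitSlash r
    else
      match pvSplitSlash r with
      | [] => [[c]]
      | p :: ps => (c :: p) :: ps

lemma pvSplitSlash_cons (s : List Char) : ∃ t, pvSplitSlash s = pvName s :: t := by
  induction s with
  | nil => exact ⟨[], rfl⟩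
  | cons c r ih =>
    obtain ⟨t, ht⟩ := ih
    by_cases hc : c = '/'
    · exact ⟨pvSplitSlash r, by simp [pvSplitSlash, hc, pvName, List.takeWhile]⟩
    · exact ⟨t, by simp [pvSplitSlash, hc, ht, pvName, List.takeWhile]⟩

lemma pvSplitSlash_no_slash (s : List Char) (h : '/' ∉ s) : pvSplitSlash s = [s] := by
  induction s with
  | nil => rfl
  | cons c r ih =>
    have hc : c ≠ '/' := fun e => h (by simp [e])
    have hr : '/' ∉ r := fun e => h (by simp [e])
    simp [pvSplitSlash, hc, ih hr]

lemma pvSplitSlash_slash (s : List Char) (h : '/' ∈ s) :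
    pvSplitSlash s = pvName s :: pvSplitSlash (pvRem s) := by
  induction s with
  | nil => simp at h
  | cons c r ih =>
    by_cases hc : c = '/'
    · simp [pvSplitSlash, hc, pvName, pvRem, List.takeWhile]
    · have hr : '/' ∈ r := by
        rcases List.mem_cons.mp h with e | e
        · exact absurd e.symm hc
        · exact e
      simp only [pvSplitSlash]
      rw [if_neg hc, ih hr]
      simp [pvName, pvRem, List.takeWhile, hc]

-- the fueled splitOn.go computes the reference split
lemma pv_go_eq (fuel : Nat) (l cur : List Char) (acc : List (List Char))
    (h : l.length < fuel) :
    PySem.Chars.splitOn.go ['/'] fuel l cur acc =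
      acc.reverse ++ ((cur.reverse ++ pvName l) :: (pvSplitSlash l).tail) := by
  induction fuel generalizing l cur acc with
  | zero => omega
  | succ f ih =>
    cases l with
    | nil => simp [PySem.Chars.splitOn.go, pvSplitSlash, pvName, List.takeWhile]
    | cons c rest =>
      by_cases hc : c = '/'
      · have hp : List.isPrefixOf ['/'] (c :: rest) = true := by simp [List.isPrefixOf, hc]
        rw [PySem.Chars.splitOn.go]
        simp only [hp, if_pos]
        rw [show List.drop ['/'].length (c :: rest) = rest from rfl]
        rw [ih rest [] (cur.reverse :: acc) (by simp at h ⊢; omega)]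
        obtain ⟨t, ht⟩ := pvSplitSlash_cons rest
        simp [pvSplitSlash, hc, ht, pvName, List.takeWhile]
      · have hp : List.isPrefixOf ['/'] (c :: rest) = false := by
          simp only [List.isPrefixOf, Bool.and_eq_false_iff, beq_eq_false_iff_ne, ne_eq]
          exact Or.inl (fun e => hc e.symm)
        rw [PySem.Chars.splitOn.go]
        simp only [hp, Bool.false_eq_true, if_neg, not_false_eq_true]
        rw [ih rest (c :: cur) acc (by simp at h ⊢; omega)]
        obtain ⟨t, ht⟩ := pvSplitSlash_cons rest
        simp [pvSplitSlash, hc, ht, pvName, List.takeWhile, List.append_assoc]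

lemma pv_splitOn_slash (s : List Char) :
    PySem.Chars.splitOn s ['/'] = pvSplitSlash s := by
  rw [PySem.Chars.splitOn, pv_go_eq _ _ _ _ (by omega)]
  obtain ⟨t, ht⟩ := pvSplitSlash_cons s
  simp [ht]

lemma pvSplit_eq (pt : String) :
    pvSplit pt = (pvSplitSlash pt.toList).map String.ofList := by
  simp [pvSplit, PySem.Str.split?, PySem.Chars.split?, pv_splitOn_slash]

lemma pvSplit_good (pt : String) (h : '/' ∈ pt.toList) :
    pvSplit pt = String.ofList (pvName pt.toList) :: String.ofList (pvTyp pt.toList)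
      :: ((pvSplitSlash (pvRem pt.toList)).tail.map String.ofList) := by
  rw [pvSplit_eq, pvSplitSlash_slash _ h]
  obtain ⟨t, ht⟩ := pvSplitSlash_cons (pvRem pt.toList)
  rw [ht]
  simp [pvTyp, pvName]

lemma pvSplit_bad (pt : String) (h : '/' ∉ pt.toList) :
    pvSplit pt = [pt] := by
  rw [pvSplit_eq, pvSplitSlash_no_slash _ h]
  simp

-- pvPartition characterisation
lemma pv_tw_norm (cs : List Char) :
    cs.takeWhile (fun x => !decide (x = '/')) = cs.takeWhile (· ≠ '/') := by
  simp only [ne_eq, decide_not]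

lemma pvPartition_good (cs : List Char) (h : '/' ∈ cs) :
    pvPartition cs = (pvName cs, true, pvRem cs) := by
  have hne : ¬ (List.takeWhile (fun x => !decide (x = '/')) cs).length = cs.length := by
    rw [pv_tw_norm]
    intro he
    have heq : cs.takeWhile (· ≠ '/') = cs :=
      (List.takeWhile_prefix _).eq_of_length he
    have := List.takeWhile_eq_self_iff.mp heq '/' h
    simp at this
  simp [pvPartition, hne, pvName, pvRem]

lemma pvPartition_bad (cs : List Char) (h : '/' ∉ cs) :
    pvPartition cs = (cs, false, []) := by
  have heq : List.takeWhile (fun x => !decide (x = '/')) cs = cs := by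
    rw [pv_tw_norm]; exact pv_takeWhile_all cs h
  simp [pvPartition, heq]

-- mapM over the split list, phrased on the original plist
lemma pv_mapM_map_some {α β γ : Type} (f : β → Option γ) (g : α → β) (r : α → γ)
    (l : List α) (h : ∀ x ∈ l, f (g x) = some (r x)) :
    (l.map g).mapM f = some (l.map r) := by
  induction l with
  | nil => rfl
  | cons a l ih =>
    simp only [List.map_cons, List.mapM_cons, h a (by simp),
      ih (fun x hx => h x (by simp [hx])), Option.bind_eq_bind]
    rfl

lemma pv_mapM_map_none {α β γ : Type} (f : β → Option γ) (g : α → β)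
    (l : List α) (x : α) (hx : x ∈ l) (h : f (g x) = none) :
    (l.map g).mapM f = none := by
  induction l with
  | nil => simp at hx
  | cons a l ih =>
    rcases List.mem_cons.mp hx with rfl | hx'
    · simp [List.mapM_cons, h]
    · simp only [List.map_cons, List.mapM_cons, Option.bind_eq_bind]
      cases f (g a) with
      | none => rfl
      | some b => simp [ih hx']

-- the separator-prefixing join B computes
def pvJ (sep : List Char) : Bool → List (List Char) → List Char
  | _, [] => []
  | first, p :: ps => (if first then p else sep ++ p) ++ pvJ sep false ps

lemma pvJ_eq_join (sep : List Char) (ps : List (List Char)) :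
    pvJ sep true ps = PySem.Chars.join sep ps := by
  induction ps with
  | nil => simp [pvJ, PySem.Chars.join_nil]
  | cons p t ih =>
    cases t with
    | nil => simp [pvJ, PySem.Chars.join_singleton]
    | cons q t' =>
      rw [PySem.Chars.join_cons_cons, ← ih]
      simp [pvJ, List.append_assoc]

-- B's loop invariant on well-formed input
lemma pvBLoop_good (l : List String) (h : ∀ pt ∈ l, '/' ∈ pt.toList)
    (first : Bool) (s1 s2 s3 s4 s5 : List Char) :
    pvBLoop l first (s1, s2, s3, s4, s5) = some
      (s1 ++ pvJ (", ").toList first (l.map (fun pt => pvTyp pt.toList ++ [' '] ++ pvName pt.toList)),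
       s2 ++ pvJ (";\n\t\t").toList first (l.map (fun pt => pvTyp pt.toList ++ [' '] ++ pvName pt.toList ++ ['_'])),
       s3 ++ pvJ ("\n\t\t\t").toList first (l.map (fun pt => pvName pt.toList ++ ("_ = ").toList ++ pvName pt.toList ++ [';'])),
       s4 ++ pvJ (", ").toList first (l.map (fun pt => pvTyp pt.toList)),
       s5 ++ pvJ [','] first (l.map (fun pt => pvName pt.toList))) := by
  induction l generalizing first s1 s2 s3 s4 s5 with
  | nil => simp [pvBLoop, pvJ]
  | cons pt rest ih =>
    have htyp : (pvPartition (pvRem pt.toList)).1 = pvTyp pt.toList := by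
      by_cases hr : '/' ∈ pvRem pt.toList
      · rw [pvPartition_good _ hr]; rfl
      · rw [pvPartition_bad _ hr]
        simp only [pvTyp]
        exact (pv_takeWhile_all _ hr).symm
    rw [pvBLoop, pvPartition_good _ (h pt (by simp))]
    simp only [htyp, ih (fun x hx => h x (by simp [hx])), List.map_cons, pvJ]
    cases first <;> simp [List.append_assoc]

lemma pvBLoop_bad (l : List String) (h : ∃ pt ∈ l, '/' ∉ pt.toList)
    (first : Bool) (acc : List Char × List Char × List Char × List Char × List Char) :
    pvBLoop l first acc = none := by
  induction l generalizing first acc with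
  | nil => simp at h
  | cons pt rest ih =>
    obtain ⟨x, hx, hbad⟩ := h
    obtain ⟨s1, s2, s3, s4, s5⟩ := acc
    rcases List.mem_cons.mp hx with rfl | hx'
    · rw [pvBLoop, pvPartition_bad _ hbad]
    · by_cases hpt : '/' ∈ pt.toList
      · rw [pvBLoop, pvPartition_good _ hpt]
        exact ih ⟨x, hx', hbad⟩ _ _
      · rw [pvBLoop, pvPartition_bad _ hpt]

-- first two elements of a cons-shaped list
lemma pv_pyGet0 {α : Type} (s : α) (t : List α) :
    PySem.List.pyGet? (s :: t) 0 = some s := by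
  simp [PySem.List.pyGet?, PySem.List.pyIdx?]

lemma pv_pyGet1 {α : Type} (s u : α) (t : List α) :
    PySem.List.pyGet? (s :: u :: t) 1 = some u := by
  simp [PySem.List.pyGet?, PySem.List.pyIdx?]

-- ===== VERDICT (by name: the statement is the Claim_ definition above) =====
theorem produce_var_list_spec : Claim_equal_produce_var_list := by
  intro plist _
  show produce_var_list plist = produce_var_list_alt plist
  by_cases hall : ∀ pt ∈ plist, '/' ∈ pt.toList
  · have hget0 : ∀ pt ∈ plist,
        PySem.List.pyGet? (pvSplit pt) 0 = some (String.ofList (pvName pt.toList)) := by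
      intro pt hpt
      rw [pvSplit_good pt (hall pt hpt)]
      exact pv_pyGet0 _ _
    have hget1 : ∀ pt ∈ plist,
        PySem.List.pyGet? (pvSplit pt) 1 = some (String.ofList (pvTyp pt.toList)) := by
      intro pt hpt
      rw [pvSplit_good pt (hall pt hpt)]
      exact pv_pyGet1 _ _ _
    have h1 : (plist.map (fun pt => pvSplit pt)).mapM (fun pt =>
          (PySem.List.pyGet? pt 1).bind fun a =>
            (PySem.List.pyGet? pt 0).map fun b => (a ++ " ") ++ b)
        = some (plist.map (fun pt =>
            String.ofList (pvTyp pt.toList ++ [' '] ++ pvName pt.toList))) :=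
      pv_mapM_map_some _ _ _ _ (fun x hx => by
        rw [hget1 x hx, hget0 x hx]
        simp only [Option.bind_some, Option.map_some, Option.some.injEq]
        rw [← String.toList_inj]; simp)
    have h2 : (plist.map (fun pt => pvSplit pt)).mapM (fun pt =>
          (PySem.List.pyGet? pt 1).bind fun a =>
            (PySem.List.pyGet? pt 0).map fun b => ((a ++ " ") ++ b) ++ "_")
        = some (plist.map (fun pt =>
            String.ofList (pvTyp pt.toList ++ [' '] ++ pvName pt.toList ++ ['_']))) :=
      pv_mapM_map_some _ _ _ _ (fun x hx => by
        rw [hget1 x hx, hget0 x hx]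
        simp only [Option.bind_some, Option.map_some, Option.some.injEq]
        rw [← String.toList_inj]; simp)
    have h3 : (plist.map (fun pt => pvSplit pt)).mapM (fun pt =>
          (PySem.List.pyGet? pt 0).map fun a => ((a ++ "_ = ") ++ a) ++ ";")
        = some (plist.map (fun pt =>
            String.ofList (pvName pt.toList ++ ("_ = ").toList ++ pvName pt.toList ++ [';']))) :=
      pv_mapM_map_some _ _ _ _ (fun x hx => by
        rw [hget0 x hx]
        simp only [Option.map_some, Option.some.injEq]
        rw [← String.toList_inj]; simp)
    have h4 : (plist.map (fun pt => pvSplit pt)).mapM (fun pt => PySem.List.pyGet? pt 1)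
        = some (plist.map (fun pt => String.ofList (pvTyp pt.toList))) :=
      pv_mapM_map_some _ _ _ _ (fun x hx => hget1 x hx)
    have h5 : (plist.map (fun pt => pvSplit pt)).mapM (fun pt => PySem.List.pyGet? pt 0)
        = some (plist.map (fun pt => String.ofList (pvName pt.toList))) :=
      pv_mapM_map_some _ _ _ _ (fun x hx => hget0 x hx)
    rw [produce_var_list, produce_var_list_alt,
      pvBLoop_good plist hall true [] [] [] [] []]
    simp only [h1, h2, h3, h4, h5, List.nil_append, pvJ_eq_join]
    simp [PySem.Dict.insert]
    and_intros <;> (rw [← String.toList_inj]; simp [PySem.Str.join, List.map_map, Function.comp_def])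
  · obtain ⟨x, hx, hbad⟩ : ∃ x ∈ plist, '/' ∉ x.toList := by
      rcases not_forall.mp hall with ⟨x, hx⟩
      rcases Classical.not_imp.mp hx with ⟨hmem, hslash⟩
      exact ⟨x, hmem, hslash⟩
    have hA : (plist.map (fun pt => pvSplit pt)).mapM (fun pt =>
          (PySem.List.pyGet? pt 1).bind fun a =>
            (PySem.List.pyGet? pt 0).map fun b => (a ++ " ") ++ b) = none :=
      pv_mapM_map_none _ _ _ x hx (by
        rw [pvSplit_bad x hbad]
        simp [PySem.List.pyGet?, PySem.List.pyIdx?])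
    rw [produce_var_list, produce_var_list_alt,
      pvBLoop_bad plist ⟨x, hx, hbad⟩ true ([], [], [], [], [])]
    simp only [hA]
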